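-- pv_equiv track=rewrite | github.com/adityabhardwaj1712/data-ops-platform | backend/app/scraper/logic/generic.py | _detect_block
-- ===== SOURCE A (Python) =====
-- def _detect_block(html: str, status_code: int = 200) -> bool:
--     """
--     Detects if the page content indicates a bot block.
--     """
--     if status_code in [403, 429]:
--         return True
--
--     lower_html = html.lower()
--     block_keywords = [
--         "captcha", "robot", "security check", "verify you are human",
--         "access denied", "blocked", "incident id", "cloudflare"
--     ]
--     return any(kw in lower_html for kw in block_keywords)
-- ===== SOURCE B (Python) =====
-- _BLOCK_KEYWORDS = ("captcha", "robot", "security check", "verify you are human",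
--                    "access denied", "blocked", "incident id", "cloudflare")
--
--
-- def _detect_block(html: str, status_code: int = 200) -> bool:
--     """Single left-to-right pass: at each position of the lowered text,
--     test whether any block keyword begins there (alternation-style scan)."""
--     if status_code == 403 or status_code == 429:
--         return True
--     lower = html.lower()
--     for i in range(len(lower)):
--         for kw in _BLOCK_KEYWORDS:
--             if lower.startswith(kw, i):
--                 return True
--     return False
-- ===== Notes on version B (the rewrite author's own statement) =====
-- stated objective: alternative
-- what changed: A runs eight independent full substring scans ('kw in lower_html', keyword-major); B makes one position-major left-to-right pass over the lowered text, testing at each index whether any keyword starts there (a hand-written single-pass alternation scan).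
import Mathlib
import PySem

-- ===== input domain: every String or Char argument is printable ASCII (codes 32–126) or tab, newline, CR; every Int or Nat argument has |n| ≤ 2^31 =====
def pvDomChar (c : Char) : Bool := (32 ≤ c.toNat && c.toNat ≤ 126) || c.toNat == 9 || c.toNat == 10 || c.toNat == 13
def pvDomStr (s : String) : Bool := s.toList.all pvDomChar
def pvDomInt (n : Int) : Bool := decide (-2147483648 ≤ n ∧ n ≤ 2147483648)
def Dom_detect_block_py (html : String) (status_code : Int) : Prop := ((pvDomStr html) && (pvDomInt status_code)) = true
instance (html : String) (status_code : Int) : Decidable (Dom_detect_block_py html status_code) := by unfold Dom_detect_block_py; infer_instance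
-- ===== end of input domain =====

-- B replaces A's eight keyword-major substring scans by one position-major left-to-right pass over the lowered text (alternative strategy, same asymptotic cost).

-- ===== PORT A =====
def blockKeywords : List String :=
  ["captcha", "robot", "security check", "verify you are human",
   "access denied", "blocked", "incident id", "cloudflare"]

def detect_block_py (html : String) (status_code : Int) : Bool :=
  if [(403 : Int), 429].contains status_code then true
  else
    let lower_html := PySem.Str.lower html
    blockKeywords.any (fun kw => PySem.Str.isIn kw lower_html)

-- ===== PORT B =====
def blockKeywordsAlt : List (List Char) :=
  ["captcha".toList, "robot".toList, "security check".toList, "verify you are human".toList,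
   "access denied".toList, "blocked".toList, "incident id".toList, "cloudflare".toList]

-- one pass over the lowered text: at each position, does some keyword start here?
def scanBlock (kws : List (List Char)) : List Char → Bool
  | [] => false
  | c :: rest => kws.any (fun kw => kw.isPrefixOf (c :: rest)) || scanBlock kws rest

def detect_block_py_alt (html : String) (status_code : Int) : Bool :=
  if status_code == 403 || status_code == 429 then true
  else scanBlock blockKeywordsAlt (PySem.Str.lower html).toList

-- ===== PRECONDITION & SPEC =====
def Spec_detect_block_py (html : String) (status_code : Int) (out : Bool) : Prop := out = detect_block_py_alt html status_code
instance (html : String) (status_code : Int) (out : Bool) : Decidable (Spec_detect_block_py html status_code out) := by unfold Spec_detect_block_py; infer_instance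

-- ===== CLAIM (what is proved, stated in full; the proofs are below) =====
def Claim_equal_detect_block_py : Prop := ∀ (html : String) (status_code : Int), Dom_detect_block_py html status_code → Spec_detect_block_py html status_code (detect_block_py html status_code)

-- ===== LEMMAS AND PROOFS =====

-- ===== VERDICT (by name: the statement is the Claim_ definition above) =====
theorem scanBlock_eq (kws : List (List Char)) (h : ∀ kw ∈ kws, kw ≠ [])
    (l : List Char) : scanBlock kws l = kws.any (fun kw => decide (kw <:+: l)) := by
  induction l with
  | nil =>
    rw [scanBlock]
    symm
    rw [List.any_eq_false]
    intro kw hkw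
    simp [List.infix_nil, h kw hkw]
  | cons c rest ih =>
    rw [scanBlock, ih, Bool.eq_iff_iff]
    simp only [Bool.or_eq_true, List.any_eq_true, decide_eq_true_eq,
      List.infix_cons_iff, List.isPrefixOf_iff_prefix]
    constructor
    · rintro (⟨kw, hkw, hp⟩ | ⟨kw, hkw, hi⟩)
      · exact ⟨kw, hkw, Or.inl hp⟩
      · exact ⟨kw, hkw, Or.inr hi⟩
    · rintro ⟨kw, hkw, hp | hi⟩
      · exact Or.inl ⟨kw, hkw, hp⟩
      · exact Or.inr ⟨kw, hkw, hi⟩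

theorem str_isIn_eq_decide (sub s : String) :
    PySem.Str.isIn sub s = decide (sub.toList <:+: s.toList) := by
  rw [Bool.eq_iff_iff]; simp [PySem.Chars.isIn_iff_infix]

theorem detect_block_py_spec : Claim_equal_detect_block_py := by
  intro html status_code _
  unfold Spec_detect_block_py detect_block_py detect_block_py_alt
  by_cases hs : status_code = 403 ∨ status_code = 429
  · rcases hs with h | h <;> simp [h]
  · push Not at hs
    rw [if_neg (by simp [hs.1, hs.2]), if_neg (by simp [hs.1, hs.2])]
    rw [scanBlock_eq _ (by decide)]
    have hmap : blockKeywordsAlt = blockKeywords.map String.toList := by decide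
    rw [hmap, List.any_map]
    simp only [str_isIn_eq_decide]
    rfl
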